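-- pv_equiv track=rewrite | github.com/enzoblain/sudokusolver | main.py | sort_sudoku
-- ===== SOURCE A (Python) =====
-- def sort_sudoku(number):
--     # Create the variable containing the sorted sudoku
--     sorted_sudoku = []
--     # Create each line of the sorted sudoku
--     for i in range(number):
--         # Create the variable containing the line of the sudoku
--         line = []
--         # Check each number
--         for numbers in range(number):
--             # Add the number in the list
--             line.append(str(numbers))
--         # Add the line in the sudoku
--         sorted_sudoku.append(line)
--     # Return the sorted sudoku
--     return sorted_sudoku
-- ===== SOURCE B (Python) =====
-- def sort_sudoku(number):
--     # A non-positive size yields an empty grid.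
--     if number <= 0:
--         return []
--     # Generate all n*n cells in one flat pass using modular arithmetic,
--     # then chunk the flat list into rows by slicing.
--     cells = [str(i % number) for i in range(number * number)]
--     return [cells[r * number:(r + 1) * number] for r in range(number)]
-- ===== Notes on version B (the rewrite author's own statement) =====
-- stated objective: alternative
-- what changed: Replaces the nested row-by-row append loops with a single flat pass that generates all n*n cells at once via i % n, then chunks the flat list into rows by slicing.
import Mathlib
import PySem

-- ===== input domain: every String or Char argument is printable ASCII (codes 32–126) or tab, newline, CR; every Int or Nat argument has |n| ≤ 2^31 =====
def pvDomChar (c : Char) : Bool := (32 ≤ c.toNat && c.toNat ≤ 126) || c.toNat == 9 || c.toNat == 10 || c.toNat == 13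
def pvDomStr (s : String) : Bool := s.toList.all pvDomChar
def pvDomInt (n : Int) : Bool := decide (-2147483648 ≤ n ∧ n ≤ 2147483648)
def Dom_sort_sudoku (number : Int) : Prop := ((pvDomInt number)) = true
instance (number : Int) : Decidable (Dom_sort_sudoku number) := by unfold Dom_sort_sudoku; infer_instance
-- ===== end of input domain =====

-- B generates all n*n cells in one flat pass (str(i % n)) and chunks that flat list into rows by slicing, instead of A's nested append loops (objective: alternative).

-- ===== PORT A =====
def sort_sudoku (number : Int) : List (List String) :=
  (PySem.List.pyRange 0 number 1).foldl
    (fun sorted_sudoku _i =>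
      sorted_sudoku ++
        [(PySem.List.pyRange 0 number 1).foldl
          (fun line numbers => line ++ [PySem.Int.toStr numbers]) []])
    []

-- ===== PORT B =====
def sort_sudoku_alt (number : Int) : List (List String) :=
  if number ≤ 0 then []
  else
  let cells := (PySem.List.pyRange 0 (number * number) 1).map
    (fun i => PySem.Int.toStr (PySem.Int.mod i number))
  (PySem.List.pyRange 0 number 1).map
    (fun r => PySem.List.slice cells (some (r * number)) (some ((r + 1) * number)))

-- ===== PRECONDITION & SPEC =====
def Spec_sort_sudoku (number : Int) (out : List (List String)) : Prop := out = sort_sudoku_alt number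
instance (number : Int) (out : List (List String)) : Decidable (Spec_sort_sudoku number out) := by unfold Spec_sort_sudoku; infer_instance

-- ===== CLAIM (what is proved, stated in full; the proofs are below) =====
def Claim_equal_sort_sudoku : Prop := ∀ (number : Int), Dom_sort_sudoku number → Spec_sort_sudoku number (sort_sudoku number)

-- ===== LEMMAS AND PROOFS =====

-- For 0 ≤ r < n, the slice cells[r*n : (r+1)*n] of the flat cell list is exactly the row ["0", …, str(n-1)].
theorem pv_slice_row (N : Nat) (r : Nat) (hr : r < N) :
    PySem.List.slice
      ((PySem.List.pyRange 0 ((N : Int) * (N : Int)) 1).map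
        (fun i => PySem.Int.toStr (PySem.Int.mod i (N : Int))))
      (some ((r * N : Nat) : Int)) (some (((r + 1) * N : Nat) : Int))
    = (PySem.List.pyRange 0 (N : Int) 1).map PySem.Int.toStr := by
  rw [PySem.List.slice_natCast]
  apply List.ext_getElem
  · simp [PySem.List.length_pyRange_one]
    have : ((N : Int) * N).toNat = N * N := by
      rw [← Int.natCast_mul, Int.toNat_natCast]
    rw [this]
    have h1 : (r + 1) * N - r * N = N := by
      rw [Nat.add_mul, one_mul]; omega
    rw [h1]
    have h2 : N * N - r * N ≥ N := by
      calc N ≤ (N - r) * N := Nat.le_mul_of_pos_left N (by omega)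
        _ = N * N - r * N := by rw [Nat.sub_mul]
    omega
  · intro k h1 h2
    rw [List.getElem_take, List.getElem_drop]
    rw [List.getElem_map, List.getElem_map]
    rw [PySem.List.getElem_pyRange_one, PySem.List.getElem_pyRange_one]
    have hkN : k < N := by
      simpa [PySem.List.length_pyRange_one] using h2
    have hNpos : 0 < N := by omega
    rw [PySem.Int.mod_eq_emod_of_pos (by exact_mod_cast hNpos)]
    congr 1
    push_cast
    have : (0 : Int) + (↑r * ↑N + ↑k) = ↑k + ↑N * ↑r := by ring
    rw [this, Int.add_mul_emod_self_left, Int.emod_eq_of_lt (by positivity) (by exact_mod_cast hkN)]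
    ring

-- ===== VERDICT (by name: the statement is the Claim_ definition above) =====
theorem sort_sudoku_spec : Claim_equal_sort_sudoku := by
  intro number _
  unfold Spec_sort_sudoku sort_sudoku sort_sudoku_alt
  rw [PySem.List.foldl_append_singleton_eq_map, PySem.List.foldl_append_singleton_eq_map]
  simp only [List.nil_append]
  by_cases hpos : 0 < number
  case neg =>
    rw [PySem.List.pyRange_one_eq_nil (by omega), if_pos (by omega)]
    simp
  case pos =>
    rw [if_neg (by omega)]
    lift number to ℕ using hpos.le with N
    apply List.map_congr_left
    intro r hr
    obtain ⟨hr0, hrn⟩ := (PySem.List.mem_pyRange_one).1 hr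
    lift r to ℕ using hr0 with rr
    have hlt : rr < N := by exact_mod_cast hrn
    have h1 : (rr : Int) * N = ((rr * N : Nat) : Int) := by push_cast; ring
    have h2 : ((rr : Int) + 1) * N = (((rr + 1) * N : Nat) : Int) := by push_cast; ring
    rw [h1, h2, pv_slice_row N rr hlt]
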